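-- pv_equiv track=rewrite | github.com/LePanda026/Code-for-DPEPO | agent_system/multi_turn_rollout/rollout_loop_parallel.py | count_longest_ordered_subsequence
-- ===== SOURCE A (Python) =====
-- def count_longest_ordered_subsequence(ground_truth, prediction):
--     if not ground_truth or not prediction:
--         return 0
--
--     i = 0  # 指向 ground_truth
--     j = 0  # 指向 agent
--
--     matched = 0
--     while i < len(ground_truth) and j < len(prediction):
--         if ground_truth[i] == prediction[j]:
--             matched += 1
--             i += 1   # 只有匹配成功才前进 ground_truth
--         j += 1       # agent 永远前进
--
--     return matched
-- ===== SOURCE B (Python) =====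
-- def count_longest_ordered_subsequence(ground_truth, prediction):
--     # Index prediction by value: value -> sorted list of positions, then for each
--     # ground_truth element binary-search the first position not yet consumed.
--     positions = {}
--     for idx, p in enumerate(prediction):
--         positions[p] = positions.get(p, []) + [idx]
--     matched = 0
--     j = 0
--     for g in ground_truth:
--         lst = positions.get(g, [])
--         lo, hi = 0, len(lst)
--         while lo < hi:
--             mid = (lo + hi) // 2
--             if lst[mid] < j:
--                 lo = mid + 1
--             else:
--                 hi = mid
--         if lo == len(lst):
--             break
--         matched += 1
--         j = lst[lo] + 1
--     return matched
-- ===== Notes on version B (the rewrite author's own statement) =====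
-- stated objective: alternative
-- what changed: Replaced A's flat two-pointer scan of prediction by a two-stage algorithm: a first pass builds a dict mapping each value to its sorted list of prediction positions, then each ground_truth element binary-searches that list for the first position past the last consumed index (breaking when none remains).
import Mathlib
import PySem

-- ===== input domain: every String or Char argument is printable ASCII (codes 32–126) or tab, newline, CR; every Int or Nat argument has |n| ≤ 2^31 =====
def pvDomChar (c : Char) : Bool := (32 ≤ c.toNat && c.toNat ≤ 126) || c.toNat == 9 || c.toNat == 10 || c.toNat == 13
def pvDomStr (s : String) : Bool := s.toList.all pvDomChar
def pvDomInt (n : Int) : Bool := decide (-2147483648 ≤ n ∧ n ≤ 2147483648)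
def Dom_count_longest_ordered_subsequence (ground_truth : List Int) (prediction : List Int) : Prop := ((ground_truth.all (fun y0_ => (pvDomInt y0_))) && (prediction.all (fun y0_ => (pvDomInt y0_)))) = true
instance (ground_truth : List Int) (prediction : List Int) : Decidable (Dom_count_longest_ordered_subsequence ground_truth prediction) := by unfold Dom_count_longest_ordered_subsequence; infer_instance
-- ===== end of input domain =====

-- B indexes prediction into a value -> sorted-position-list dict and binary-searches the first usable position per ground_truth element, instead of A's flat two-pointer scan (alternative algorithm, same results).


-- ===== PORT A =====
-- A, transliterated: a single while loop over (i, j); j advances every iteration,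
-- i and matched advance only on a match. The suffixes at i and j are the recursion state.
def pvA_loop : List Int → List Int → Int → Int
  | g :: gs, p :: ps, matched =>
      if g = p then pvA_loop gs ps (matched + 1)
      else pvA_loop (g :: gs) ps matched
  | _, _, matched => matched
termination_by gs ps _ => ps.length

def count_longest_ordered_subsequence (ground_truth : List Int) (prediction : List Int) : Int :=
  if ground_truth = [] ∨ prediction = [] then 0
  else pvA_loop ground_truth prediction 0

-- ===== PORT B =====
-- B's first pass: positions[p] = positions.get(p, []) + [idx] over enumerate(prediction).
def pvBuildPositions (prediction : List Int) : PySem.Dict Int (List Int) :=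
  (PySem.List.enumerate prediction 0).foldl
    (fun d ip => d.modify ip.2 [] (fun l => l ++ [ip.1])) PySem.Dict.empty

-- B's inner while loop: the hand-written binary search, (lo+hi)//2 on Nat bounds;
-- lst[mid] is ported as getD (mid < hi ≤ lst.length at every call here, so exact).
def pvBisect (lst : List Int) (j : Int) (lo hi : Nat) : Nat :=
  if lo < hi then
    let mid := (lo + hi) / 2
    if lst.getD mid 0 < j then pvBisect lst j (mid + 1) hi
    else pvBisect lst j lo mid
  else lo
termination_by hi - lo

-- B's outer for-loop over ground_truth, carrying j and matched; break = return matched.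
def pvB_loop (positions : PySem.Dict Int (List Int)) : List Int → Int → Int → Int
  | [], _, matched => matched
  | g :: gs, j, matched =>
      let lst := positions.getD g []
      let lo := pvBisect lst j 0 lst.length
      if lo = lst.length then matched
      else pvB_loop positions gs (lst.getD lo 0 + 1) (matched + 1)

def count_longest_ordered_subsequence_alt (ground_truth : List Int) (prediction : List Int) : Int :=
  pvB_loop (pvBuildPositions prediction) ground_truth 0 0

-- ===== PRECONDITION & SPEC =====
def Spec_count_longest_ordered_subsequence (ground_truth : List Int) (prediction : List Int) (out : Int) : Prop := out = count_longest_ordered_subsequence_alt ground_truth prediction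
instance (ground_truth : List Int) (prediction : List Int) (out : Int) : Decidable (Spec_count_longest_ordered_subsequence ground_truth prediction out) := by unfold Spec_count_longest_ordered_subsequence; infer_instance

-- ===== CLAIM (what is proved, stated in full; the proofs are below) =====
def Claim_equal_count_longest_ordered_subsequence : Prop := ∀ (ground_truth : List Int) (prediction : List Int), Dom_count_longest_ordered_subsequence ground_truth prediction → Spec_count_longest_ordered_subsequence ground_truth prediction (count_longest_ordered_subsequence ground_truth prediction)

-- ===== LEMMAS AND PROOFS =====

-- The positions list B's dict stores under g: the indices of the occurrences of g in pred.
def pvPos (pred : List Int) (g : Int) : List Int :=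
  ((PySem.List.enumerate pred 0).filter (fun ip => ip.2 == g)).map (·.1)

theorem pvBuild_getD (pred : List Int) (g : Int) :
    (pvBuildPositions pred).getD g [] = pvPos pred g := by
  unfold pvBuildPositions pvPos
  have := PySem.Dict.getD_foldl_modify_append (l := (PySem.List.enumerate pred 0).map Prod.swap)
    (d := (PySem.Dict.empty : PySem.Dict Int (List Int))) (c := g)
  rw [List.foldl_map] at this
  simp only [Prod.swap] at this
  rw [this]
  simp [List.filter_map, List.map_map, Function.comp_def]

theorem pvPos_mem (pred : List Int) (g x : Int) :
    x ∈ pvPos pred g ↔ ∃ (k : Nat) (h : k < pred.length), pred[k] = g ∧ x = (k : Int) := by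
  simp only [pvPos, List.mem_map, List.mem_filter, PySem.List.mem_enumerate_iff]
  constructor
  · rintro ⟨⟨a, b⟩, ⟨⟨k, hk, hp⟩, hg⟩, hx⟩
    cases hp
    exact ⟨k, hk, by simpa using hg, by simpa using hx.symm⟩
  · rintro ⟨k, hk, hg, hx⟩
    exact ⟨((k : Int), pred[k]), ⟨⟨k, hk, by simp⟩, by simpa using hg⟩, by simpa using hx.symm⟩

theorem pvPos_sorted (pred : List Int) (g : Int) : (pvPos pred g).Pairwise (· < ·) := by
  unfold pvPos
  refine List.Pairwise.map _ ?_ (List.Pairwise.filter _ (PySem.List.pairwise_lt_enumerate pred 0))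
  exact fun a b h => h

-- A sorted list is monotone in its indices.
theorem pvMono (lst : List Int) (hs : lst.Pairwise (· < ·)) :
    ∀ i k, i ≤ k → k < lst.length → lst.getD i 0 ≤ lst.getD k 0 := by
  intro i k hik hk
  rcases Nat.lt_or_eq_of_le hik with h | h
  · have := (List.pairwise_iff_getElem.mp hs) i k (lt_trans h hk) hk h
    rw [List.getD_eq_getElem _ _ (lt_trans h hk), List.getD_eq_getElem _ _ hk]
    exact le_of_lt this
  · subst h; exact le_refl _

-- Binary-search result characterised: everything before the result is < j,
-- everything from the result on is ≥ j (given a sorted list and correct boundary state).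
theorem pvBisect_spec (lst : List Int) (hs : lst.Pairwise (· < ·)) (j : Int) :
    ∀ lo hi, hi ≤ lst.length → lo ≤ hi →
      (∀ i, i < lo → lst.getD i 0 < j) →
      (∀ i, hi ≤ i → i < lst.length → j ≤ lst.getD i 0) →
      (pvBisect lst j lo hi ≤ lst.length ∧
       (∀ i, i < pvBisect lst j lo hi → lst.getD i 0 < j) ∧
       (∀ i, pvBisect lst j lo hi ≤ i → i < lst.length → j ≤ lst.getD i 0)) := by
  intro lo hi
  induction' hn : hi - lo using Nat.strong_induction_on with n ih generalizing lo hi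
  intro hhi hlh hpre hsuf
  rw [pvBisect]
  by_cases hlt : lo < hi
  · simp only [hlt, if_true]
    set mid := (lo + hi) / 2 with hmid
    have hm1 : lo ≤ mid := by omega
    have hm2 : mid < hi := by omega
    by_cases hv : lst.getD mid 0 < j
    · simp only [hv, if_true]
      exact ih (hi - (mid + 1)) (by omega) _ _ rfl hhi (by omega)
        (fun i hi' => lt_of_le_of_lt (pvMono lst hs i mid (by omega) (by omega)) hv) hsuf
    · simp only [hv, if_false]
      have hv' : j ≤ lst.getD mid 0 := le_of_not_gt hv
      exact ih (mid - lo) (by omega) _ _ rfl (by omega) hm1 hpre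
        (fun i hi' hil => le_trans hv' (pvMono lst hs mid i hi' hil))
  · simp only [hlt, if_false]
    have : lo = hi := by omega
    subst this
    exact ⟨hhi, hpre, hsuf⟩

-- Any two indices with the < j / ≥ j split property are equal.
theorem pvSplit_unique (lst : List Int) (j : Int) (r1 r2 : Nat)
    (h1 : r1 ≤ lst.length) (h2 : r2 ≤ lst.length)
    (p1 : ∀ i, i < r1 → lst.getD i 0 < j) (s1 : ∀ i, r1 ≤ i → i < lst.length → j ≤ lst.getD i 0)
    (p2 : ∀ i, i < r2 → lst.getD i 0 < j) (s2 : ∀ i, r2 ≤ i → i < lst.length → j ≤ lst.getD i 0) :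
    r1 = r2 := by
  by_contra hne
  rcases Nat.lt_or_ge r1 r2 with h | h
  · have hx := p2 r1 h
    have := s1 r1 le_rfl (lt_of_lt_of_le h h2)
    omega
  · rcases Nat.lt_or_eq_of_le h with h | h
    · have hx := p1 r2 h
      have := s2 r2 le_rfl (lt_of_lt_of_le h h1)
      omega
    · exact hne h.symm

-- Main loop equivalence: A's loop on the suffix pred.drop j equals B's loop at index j.
theorem pvMain (pred : List Int) : ∀ (rest : List Int) (j : Nat), rest = pred.drop j →
    j ≤ pred.length → ∀ gt m,
    pvA_loop gt rest m = pvB_loop (pvBuildPositions pred) gt (j : Int) m := by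
  intro rest
  induction rest with
  | nil =>
    intro j hdrop hj gt m
    have hj' : pred.length ≤ j := by
      have := congrArg List.length hdrop
      simp [List.length_drop] at this; omega
    cases gt with
    | nil => simp [pvA_loop, pvB_loop]
    | cons g gs =>
      simp only [pvA_loop, pvB_loop, pvBuild_getD]
      set lst := pvPos pred g with hlst
      obtain ⟨hrle, hpre, hsuf⟩ := pvBisect_spec lst (pvPos_sorted pred g) (j : Int) 0 lst.length
        le_rfl (Nat.zero_le _) (by omega) (by intro i h1 h2; omega)
      have hr : pvBisect lst (j : Int) 0 lst.length = lst.length := by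
        by_contra hne
        have hrlt : pvBisect lst (j : Int) 0 lst.length < lst.length := by omega
        have hge := hsuf _ le_rfl hrlt
        have hmem : lst.getD (pvBisect lst (j : Int) 0 lst.length) 0 ∈ lst := by
          rw [List.getD_eq_getElem _ _ hrlt]; exact List.getElem_mem _
        obtain ⟨k, hk, _, hxk⟩ := (pvPos_mem pred g _).mp hmem
        rw [hxk] at hge
        have : (k : Int) < (j : Int) := by exact_mod_cast lt_of_lt_of_le hk (by exact_mod_cast hj')
        omega
      simp [hr]
  | cons p ps ih =>
    intro j hdrop hj gt m
    have hjlt : j < pred.length := by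
      have := congrArg List.length hdrop
      simp [List.length_drop] at this; omega
    have hsplit : pred.drop j = pred[j] :: pred.drop (j + 1) := List.drop_eq_getElem_cons hjlt
    rw [hsplit] at hdrop
    have hp : p = pred[j] := (List.cons.injEq _ _ _ _ ▸ hdrop).1
    have hps : ps = pred.drop (j + 1) := (List.cons.injEq _ _ _ _ ▸ hdrop).2
    cases gt with
    | nil => simp [pvA_loop, pvB_loop]
    | cons g gs =>
      have hcast : ((j : Int) + 1) = ((j + 1 : Nat) : Int) := by push_cast; ring
      simp only [pvB_loop, pvBuild_getD]
      set lst := pvPos pred g with hlst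
      obtain ⟨hrle, hpre, hsuf⟩ := pvBisect_spec lst (pvPos_sorted pred g) (j : Int) 0 lst.length
        le_rfl (Nat.zero_le _) (by omega) (by intro i h1 h2; omega)
      set r := pvBisect lst (j : Int) 0 lst.length with hrdef
      by_cases hgp : g = p
      · -- match: pred[j] = g, so j ∈ lst and the search lands exactly on j
        have hjmem : ((j : Int)) ∈ lst := (pvPos_mem pred g _).mpr ⟨j, hjlt, by rw [← hp, hgp], rfl⟩
        obtain ⟨k0, hk0, hlk0⟩ := List.mem_iff_getElem.mp hjmem
        have hk0D : lst.getD k0 0 = (j : Int) := by rw [List.getD_eq_getElem _ _ hk0]; exact hlk0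
        have hrk0 : r ≤ k0 := by
          by_contra h
          have := hpre k0 (by omega)
          omega
        have hrlt : r < lst.length := lt_of_le_of_lt hrk0 hk0
        have hrval : lst.getD r 0 = (j : Int) := by
          have h1 := hsuf r le_rfl hrlt
          have h2 := pvMono lst (pvPos_sorted pred g) r k0 hrk0 hk0
          omega
        have hrne : ¬ (r = lst.length) := by omega
        simp only [hrne, if_false, hrval]
        rw [hcast, ← ih (j + 1) hps (by omega) gs (m + 1)]
        simp [pvA_loop, hgp]
      · -- no match at j: the searches at j and j+1 coincide
        have hnomem : ((j : Int)) ∉ lst := by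
          intro hmem
          obtain ⟨k, hk, hpk, hxk⟩ := (pvPos_mem pred g _).mp hmem
          have : k = j := by exact_mod_cast hxk.symm
          subst this
          exact hgp (by rw [hp]; exact hpk.symm)
        obtain ⟨hrle', hpre', hsuf'⟩ := pvBisect_spec lst (pvPos_sorted pred g)
          ((j + 1 : Nat) : Int) 0 lst.length le_rfl (Nat.zero_le _) (by omega)
          (by intro i h1 h2; omega)
        have hreq : r = pvBisect lst ((j + 1 : Nat) : Int) 0 lst.length := by
          apply pvSplit_unique lst ((j + 1 : Nat) : Int) r _ hrle hrle'
          · intro i hi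
            have := hpre i hi
            push_cast
            omega
          · intro i hi hil
            have h1 := hsuf i hi hil
            have hmem : lst.getD i 0 ∈ lst := by
              rw [List.getD_eq_getElem _ _ hil]; exact List.getElem_mem _
            have hne : lst.getD i 0 ≠ (j : Int) := fun he => hnomem (he ▸ hmem)
            push_cast
            omega
          · exact hpre'
          · exact hsuf'
        have hA : pvA_loop (g :: gs) (p :: ps) m = pvA_loop (g :: gs) ps m := by
          simp [pvA_loop, hgp]
        rw [hA, ih (j + 1) hps (by omega) (g :: gs) m]
        simp only [pvB_loop, pvBuild_getD, ← hlst, ← hreq]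

-- ===== VERDICT (by name: the statement is the Claim_ definition above) =====
theorem count_longest_ordered_subsequence_spec : Claim_equal_count_longest_ordered_subsequence := by
  intro gt pred _
  unfold Spec_count_longest_ordered_subsequence count_longest_ordered_subsequence
    count_longest_ordered_subsequence_alt
  have h := pvMain pred pred 0 rfl (Nat.zero_le _) gt 0
  rw [Int.natCast_zero] at h
  split
  · rename_i hc
    rw [← h]
    rcases hc with hc | hc <;> subst hc
    · cases pred <;> simp [pvA_loop]
    · cases gt <;> simp [pvA_loop]
  · exact h
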